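-- pv_equiv track=rewrite | github.com/davehenton/skolagatt | schools/util.py | lesskilnings_hopar
-- ===== SOURCE A (Python) =====
-- def lesskilnings_hopar_1(hljodkerfisvitund_sum, malthroski_sum, bokstafathekking_sum):
--   '''
--   Lesskilnings hópar fyrir börn fædd á fyrsta ársþriðjungi
--   '''
--   hopar = []
--   if hljodkerfisvitund_sum == -1:
--     hopar.append('Vantar gögn')
--   elif hljodkerfisvitund_sum <= 18:
--     hopar.append('Áhætta 1 (%d)'%(hljodkerfisvitund_sum))
--   elif hljodkerfisvitund_sum <= 21:
--     hopar.append('Áhætta 2 (%d)'%(hljodkerfisvitund_sum))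
--   elif hljodkerfisvitund_sum <= 23:
--     hopar.append('Óvissa (%d)'%(hljodkerfisvitund_sum))
--   else:
--     hopar.append('Utan áhættu')
--
--   if malthroski_sum == -1:
--     hopar.append('Vantar gögn')
--   elif malthroski_sum <= 17:
--     hopar.append('Áhætta 1 (%d)'%(malthroski_sum))
--   elif malthroski_sum <= 18:
--     hopar.append('Áhætta 2 (%d)'%(malthroski_sum))
--   elif malthroski_sum <= 19:
--     hopar.append('Óvissa (%d)'%(malthroski_sum))
--   else:
--     hopar.append('Utan áhættu')
--
--   if bokstafathekking_sum == -1: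
--     hopar.append('Vantar gögn')
--   elif bokstafathekking_sum <= 11:
--     hopar.append('Áhætta 1 (%d)'%(bokstafathekking_sum))
--   elif bokstafathekking_sum <= 14:
--     hopar.append('Áhætta 2 (%d)'%(bokstafathekking_sum))
--   elif bokstafathekking_sum <= 15:
--     hopar.append('Óvissa (%d)'%(bokstafathekking_sum))
--   else:
--     hopar.append('Utan áhættu')
--
--   return hopar
--
-- def lesskilnings_hopar(aldursbil, input_values):
--   '''
--   Finna lesskilnings hópa eftir aldursbili úr niðurstöðum prófa
--   '''
--   # Cycle through input_values, sum up all values where the key starts with 'hljod_', 'mal_', 'bok_'. Checks for input errors.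
--   lesskilnings_sums = {'hljod_': 0, 'mal_': 0, 'bok_': 0}
--   for key, value in input_values.items():
--     for type_sum in lesskilnings_sums.keys():
--       # type = 'hljod_' for instance, type_sum for 'hljod_' starts as 0
--       if key.startswith(type_sum):
--         if not str(value).isdigit():
--           # Input error so we will make this type_sum permanently = -1 to indicate error
--           lesskilnings_sums[type_sum] = -1
--         elif str(value).isdigit() and not lesskilnings_sums[type_sum] == -1:
--           # Not input error so let's add up
--           lesskilnings_sums[type_sum] += int(value)
--
--   # hljodkerfisvitund_sum = sum([ int(value) for key, value in input_values.items() if key.startswith("hljod_") and value.isdigit() ])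
--   # Same thing for keys that start with 'mal_'
--   # malthroski_sum = sum([ int(value) for key, value in input_values.items() if key.startswith("mal_") and value.isdigit() ])
--   # And again for keys that start with 'bok_'
--   # bokstafathekking_sum = sum([ int(value) for key, value in input_values.items() if key.startswith("bok_") and value.isdigit() ])
--
--   if aldursbil == 'bil 1':
--     return lesskilnings_hopar_1(lesskilnings_sums["hljod_"], lesskilnings_sums["mal_"], lesskilnings_sums["bok_"])
--   elif aldursbil == 'bil 2':
--     return lesskilnings_hopar_1(lesskilnings_sums["hljod_"], lesskilnings_sums["mal_"], lesskilnings_sums["bok_"])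
--   else:
--     return lesskilnings_hopar_1(lesskilnings_sums["hljod_"], lesskilnings_sums["mal_"], lesskilnings_sums["bok_"])
-- ===== SOURCE B (Python) =====
-- # -*- coding: utf-8 -*-
-- # B: collect-then-validate sums per prefix + a table-driven threshold->label mapping,
-- # replacing A's sticky-sentinel dict mutation loop and three copy-pasted if/elif cascades.
--
-- TABLES = [
--     ('hljod_', [(18, 'Áhætta 1'), (21, 'Áhætta 2'), (23, 'Óvissa')]),
--     ('mal_',   [(17, 'Áhætta 1'), (18, 'Áhætta 2'), (19, 'Óvissa')]),
--     ('bok_',   [(11, 'Áhætta 1'), (14, 'Áhætta 2'), (15, 'Óvissa')]),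
-- ]
--
--
-- def _total(input_values, prefix):
--     vals = [v for k, v in input_values.items() if k.startswith(prefix)]
--     if any(not str(v).isdigit() for v in vals):
--         return -1
--     return sum(int(v) for v in vals)
--
--
-- def _label(s, table):
--     if s == -1:
--         return 'Vantar gögn'
--     for hi, name in table:
--         if s <= hi:
--             return '%s (%d)' % (name, s)
--     return 'Utan áhættu'
--
--
-- def lesskilnings_hopar(aldursbil, input_values):
--     return [_label(_total(input_values, prefix), table) for prefix, table in TABLES]
-- ===== Notes on version B (the rewrite author's own statement) =====
-- stated objective: simpler
-- what changed: Replaces A's dict-mutating loop with a sticky -1 sentinel and three copy-pasted if/elif cascades by a per-prefix collect-then-validate sum (-1 iff any matching value fails isdigit, else the sum) and one table-driven threshold-to-label function applied over a list of (prefix, table) rows.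
import Mathlib
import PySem

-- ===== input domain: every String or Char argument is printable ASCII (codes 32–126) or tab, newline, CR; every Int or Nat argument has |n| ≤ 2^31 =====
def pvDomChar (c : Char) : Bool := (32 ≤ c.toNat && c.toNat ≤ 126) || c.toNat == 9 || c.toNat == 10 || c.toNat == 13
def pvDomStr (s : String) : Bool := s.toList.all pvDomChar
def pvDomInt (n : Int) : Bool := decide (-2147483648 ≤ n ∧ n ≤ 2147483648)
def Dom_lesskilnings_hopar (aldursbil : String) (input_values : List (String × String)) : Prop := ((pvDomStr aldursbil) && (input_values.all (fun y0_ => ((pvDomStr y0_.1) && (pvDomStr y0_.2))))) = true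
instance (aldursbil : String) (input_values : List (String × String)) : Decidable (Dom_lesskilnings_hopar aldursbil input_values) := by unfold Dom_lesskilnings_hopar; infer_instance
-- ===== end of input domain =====

-- B replaces A's sticky-sentinel dict-mutation loop and three copy-pasted if/elif cascades by a
-- per-prefix collect-then-validate sum plus one table-driven threshold→label function (objective: simpler).

-- ===== PORT A =====

-- int(value); exact here: it is only applied to values that pass str(value).isdigit()
def pvInt (v : String) : Int := (PySem.Int.ofStr? v).getD 0

-- helper lesskilnings_hopar_1: three if/elif cascades appending to `hopar`
def pvHopar1 (hljodkerfisvitund_sum malthroski_sum bokstafathekking_sum : Int) : List String :=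
  let hopar : List String := []
  let hopar :=
    if hljodkerfisvitund_sum == -1 then hopar ++ ["Vantar gögn"]
    else if hljodkerfisvitund_sum ≤ 18 then hopar ++ ["Áhætta 1 (" ++ PySem.Int.toStr hljodkerfisvitund_sum ++ ")"]
    else if hljodkerfisvitund_sum ≤ 21 then hopar ++ ["Áhætta 2 (" ++ PySem.Int.toStr hljodkerfisvitund_sum ++ ")"]
    else if hljodkerfisvitund_sum ≤ 23 then hopar ++ ["Óvissa (" ++ PySem.Int.toStr hljodkerfisvitund_sum ++ ")"]
    else hopar ++ ["Utan áhættu"]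
  let hopar :=
    if malthroski_sum == -1 then hopar ++ ["Vantar gögn"]
    else if malthroski_sum ≤ 17 then hopar ++ ["Áhætta 1 (" ++ PySem.Int.toStr malthroski_sum ++ ")"]
    else if malthroski_sum ≤ 18 then hopar ++ ["Áhætta 2 (" ++ PySem.Int.toStr malthroski_sum ++ ")"]
    else if malthroski_sum ≤ 19 then hopar ++ ["Óvissa (" ++ PySem.Int.toStr malthroski_sum ++ ")"]
    else hopar ++ ["Utan áhættu"]
  let hopar :=
    if bokstafathekking_sum == -1 then hopar ++ ["Vantar gögn"]
    else if bokstafathekking_sum ≤ 11 then hopar ++ ["Áhætta 1 (" ++ PySem.Int.toStr bokstafathekking_sum ++ ")"]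
    else if bokstafathekking_sum ≤ 14 then hopar ++ ["Áhætta 2 (" ++ PySem.Int.toStr bokstafathekking_sum ++ ")"]
    else if bokstafathekking_sum ≤ 15 then hopar ++ ["Óvissa (" ++ PySem.Int.toStr bokstafathekking_sum ++ ")"]
    else hopar ++ ["Utan áhættu"]
  hopar

-- body of the inner `for type_sum in lesskilnings_sums.keys():` loop
def pvStepKey (kv : String × String) (s : PySem.Dict String Int) (type_sum : String) : PySem.Dict String Int :=
  if PySem.Str.startswith kv.1 type_sum then
    (if (PySem.Str.strIsdigit kv.2) = false then
      s.insert type_sum (-1)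
    else if PySem.Str.strIsdigit kv.2 && !(s.getD type_sum 0 == -1) then
      s.insert type_sum (s.getD type_sum 0 + pvInt kv.2)
    else s)
  else s

-- one iteration of the outer `for key, value in input_values.items():` loop
def pvStep (lesskilnings_sums : PySem.Dict String Int) (kv : String × String) : PySem.Dict String Int :=
  (PySem.Dict.keys lesskilnings_sums).foldl (pvStepKey kv) lesskilnings_sums

def lesskilnings_hopar (aldursbil : String) (input_values : List (String × String)) : List String :=
  let lesskilnings_sums : PySem.Dict String Int :=
    ((PySem.Dict.empty.insert "hljod_" 0).insert "mal_" 0).insert "bok_" 0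
  let lesskilnings_sums := input_values.foldl pvStep lesskilnings_sums
  -- lesskilnings_sums["hljod_"] etc.: the three keys are always present, so getD with default 0 is exact
  if aldursbil == "bil 1" then
    pvHopar1 (lesskilnings_sums.getD "hljod_" 0) (lesskilnings_sums.getD "mal_" 0) (lesskilnings_sums.getD "bok_" 0)
  else if aldursbil == "bil 2" then
    pvHopar1 (lesskilnings_sums.getD "hljod_" 0) (lesskilnings_sums.getD "mal_" 0) (lesskilnings_sums.getD "bok_" 0)
  else
    pvHopar1 (lesskilnings_sums.getD "hljod_" 0) (lesskilnings_sums.getD "mal_" 0) (lesskilnings_sums.getD "bok_" 0)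

-- ===== PORT B =====

def pvTables : List (String × List (Int × String)) :=
  [("hljod_", [(18, "Áhætta 1"), (21, "Áhætta 2"), (23, "Óvissa")]),
   ("mal_",   [(17, "Áhætta 1"), (18, "Áhætta 2"), (19, "Óvissa")]),
   ("bok_",   [(11, "Áhætta 1"), (14, "Áhætta 2"), (15, "Óvissa")])]

-- `prefix` is a Lean keyword, hence the parameter name pfx
def pvTotal (input_values : List (String × String)) (pfx : String) : Int :=
  let vals := (input_values.filter (fun kv => PySem.Str.startswith kv.1 pfx)).map Prod.snd
  if vals.any (fun v => !(PySem.Str.strIsdigit v)) then -1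
  else (vals.map pvInt).sum

def pvLabel (s : Int) (table : List (Int × String)) : String :=
  if s == -1 then "Vantar gögn"
  else
    match table.find? (fun t => decide (s ≤ t.1)) with
    | some t => t.2 ++ " (" ++ PySem.Int.toStr s ++ ")"
    | none => "Utan áhættu"

def lesskilnings_hopar_alt (aldursbil : String) (input_values : List (String × String)) : List String :=
  pvTables.map (fun pt => pvLabel (pvTotal input_values pt.1) pt.2)

-- ===== PRECONDITION & SPEC =====
def Spec_lesskilnings_hopar (aldursbil : String) (input_values : List (String × String)) (out : List String) : Prop := out = lesskilnings_hopar_alt aldursbil input_values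
instance (aldursbil : String) (input_values : List (String × String)) (out : List String) : Decidable (Spec_lesskilnings_hopar aldursbil input_values out) := by unfold Spec_lesskilnings_hopar; infer_instance

-- ===== CLAIM (what is proved, stated in full; the proofs are below) =====
def Claim_equal_lesskilnings_hopar : Prop := ∀ (aldursbil : String) (input_values : List (String × String)), Dom_lesskilnings_hopar aldursbil input_values → Spec_lesskilnings_hopar aldursbil input_values (lesskilnings_hopar aldursbil input_values)

-- ===== LEMMAS AND PROOFS =====

-- the state dict of A's loop, always on the three fixed keys
def pvMk3 (a b c : Int) : PySem.Dict String Int :=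
  ((PySem.Dict.empty.insert "hljod_" a).insert "mal_" b).insert "bok_" c

-- effect of one item of A's loop on a single sum
def pvAcc (p : String) (kv : String × String) (x : Int) : Int :=
  if PySem.Str.startswith kv.1 p then
    (if (PySem.Str.strIsdigit kv.2) = false then -1
     else if PySem.Str.strIsdigit kv.2 && !(x == -1) then x + pvInt kv.2
     else x)
  else x

theorem pvMk3_keys (a b c : Int) : (pvMk3 a b c).keys = ["hljod_", "mal_", "bok_"] := by
  simp [pvMk3, PySem.Dict.insert, PySem.Dict.empty, PySem.Dict.keys]
theorem pvMk3_ins1 (a b c v : Int) : (pvMk3 a b c).insert "hljod_" v = pvMk3 v b c := by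
  simp [pvMk3, PySem.Dict.insert, PySem.Dict.empty]
theorem pvMk3_ins2 (a b c v : Int) : (pvMk3 a b c).insert "mal_" v = pvMk3 a v c := by
  simp [pvMk3, PySem.Dict.insert, PySem.Dict.empty]
theorem pvMk3_ins3 (a b c v : Int) : (pvMk3 a b c).insert "bok_" v = pvMk3 a b v := by
  simp [pvMk3, PySem.Dict.insert, PySem.Dict.empty]
theorem pvMk3_gd1 (a b c : Int) : (pvMk3 a b c).getD "hljod_" 0 = a := by
  simp [pvMk3, PySem.Dict.getD, PySem.Dict.get?, PySem.Dict.insert, PySem.Dict.empty]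
theorem pvMk3_gd2 (a b c : Int) : (pvMk3 a b c).getD "mal_" 0 = b := by
  simp [pvMk3, PySem.Dict.getD, PySem.Dict.get?, PySem.Dict.insert, PySem.Dict.empty]
theorem pvMk3_gd3 (a b c : Int) : (pvMk3 a b c).getD "bok_" 0 = c := by
  simp [pvMk3, PySem.Dict.getD, PySem.Dict.get?, PySem.Dict.insert, PySem.Dict.empty]

theorem pvStepKey1 (a b c : Int) (kv : String × String) :
    pvStepKey kv (pvMk3 a b c) "hljod_" = pvMk3 (pvAcc "hljod_" kv a) b c := by
  simp only [pvStepKey, pvAcc, pvMk3_gd1, pvMk3_ins1]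
  split_ifs <;> rfl
theorem pvStepKey2 (a b c : Int) (kv : String × String) :
    pvStepKey kv (pvMk3 a b c) "mal_" = pvMk3 a (pvAcc "mal_" kv b) c := by
  simp only [pvStepKey, pvAcc, pvMk3_gd2, pvMk3_ins2]
  split_ifs <;> rfl
theorem pvStepKey3 (a b c : Int) (kv : String × String) :
    pvStepKey kv (pvMk3 a b c) "bok_" = pvMk3 a b (pvAcc "bok_" kv c) := by
  simp only [pvStepKey, pvAcc, pvMk3_gd3, pvMk3_ins3]
  split_ifs <;> rfl

theorem pvStep_mk3 (a b c : Int) (kv : String × String) :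
    pvStep (pvMk3 a b c) kv = pvMk3 (pvAcc "hljod_" kv a) (pvAcc "mal_" kv b) (pvAcc "bok_" kv c) := by
  rw [pvStep, pvMk3_keys]
  simp only [List.foldl, pvStepKey1, pvStepKey2, pvStepKey3]

theorem pvFoldl_mk3 (ivs : List (String × String)) : ∀ a b c : Int,
    ivs.foldl pvStep (pvMk3 a b c) =
      pvMk3 (ivs.foldl (fun x kv => pvAcc "hljod_" kv x) a)
            (ivs.foldl (fun x kv => pvAcc "mal_" kv x) b)
            (ivs.foldl (fun x kv => pvAcc "bok_" kv x) c) := by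
  induction ivs with
  | nil => intro a b c; rfl
  | cons kv tl ih => intro a b c; simp only [List.foldl, pvStep_mk3, ih]

theorem pvOpt_nonneg (o : Option Nat) :
    0 ≤ (Option.map (fun n => n) (do let a ← o; pure ((a : Int)))).getD 0 := by
  cases o <;> simp

theorem pvInt_nonneg (v : String) (h : PySem.Str.strIsdigit v = true) : 0 ≤ pvInt v := by
  have hall : ∀ c ∈ v.toList, PySem.Chars.isdigit c := by
    simp [PySem.Str.strIsdigit, PySem.Chars.strIsdigit, List.all_eq_true] at h
    exact h.2
  rw [pvInt, PySem.Int.ofStr?, PySem.Int.ofChars?]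
  have hsub : ∀ c ∈ (List.dropWhile PySem.Int.isIntSpace
      (List.dropWhile PySem.Int.isIntSpace v.toList).reverse).reverse, c ∈ v.toList := by
    intro c hc
    rw [List.mem_reverse] at hc
    have := (List.dropWhile_sublist (p := PySem.Int.isIntSpace)
        (l := (List.dropWhile PySem.Int.isIntSpace v.toList).reverse)).subset hc
    rw [List.mem_reverse] at this
    exact (List.dropWhile_sublist _).subset this
  split
  · next ds heq =>
    exfalso
    have hm : '-' ∈ v.toList := hsub _ (by rw [heq]; exact List.mem_cons_self)
    have := hall _ hm
    simp [PySem.Chars.isdigit] at this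
  · next ds heq =>
    exfalso
    have hm : '+' ∈ v.toList := hsub _ (by rw [heq]; exact List.mem_cons_self)
    have := hall _ hm
    simp [PySem.Chars.isdigit] at this
  · exact pvOpt_nonneg _

-- A's accumulator, once -1, stays -1
theorem pvSticky (p : String) (l : List (String × String)) :
    l.foldl (fun x kv => pvAcc p kv x) (-1) = -1 := by
  induction l with
  | nil => rfl
  | cons kv' tl' ih' =>
    have h : pvAcc p kv' (-1) = -1 := by
      rw [pvAcc]; split_ifs <;> simp_all
    rw [List.foldl_cons, h, ih']

-- A's per-prefix accumulation, started from any nonnegative value, is B's collect-then-validate sum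
theorem pvAcc_foldl (p : String) (ivs : List (String × String)) : ∀ a : Int, 0 ≤ a →
    ivs.foldl (fun x kv => pvAcc p kv x) a =
      (if ((ivs.filter (fun kv => PySem.Str.startswith kv.1 p)).map Prod.snd).any
            (fun v => !(PySem.Str.strIsdigit v)) then -1
       else a + (((ivs.filter (fun kv => PySem.Str.startswith kv.1 p)).map Prod.snd).map pvInt).sum) := by
  induction ivs with
  | nil => intro a _; simp
  | cons kv tl ih =>
    intro a ha
    by_cases hsw : PySem.Str.startswith kv.1 p
    · by_cases hdig : PySem.Str.strIsdigit kv.2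
      · have hne : (a == -1) = false := by simp; omega
        have hdig' : PySem.Chars.strIsdigit kv.2.toList = true := by simpa using hdig
        have h0 : 0 ≤ a + pvInt kv.2 := by
          have := pvInt_nonneg kv.2 hdig
          omega
        have hacc : pvAcc p kv a = a + pvInt kv.2 := by
          rw [pvAcc, if_pos hsw, if_neg (by simp [hdig']), if_pos (by simp [hdig', hne])]
        rw [List.foldl_cons, hacc, ih _ h0, List.filter_cons, if_pos hsw]
        simp only [List.map_cons, List.any_cons, hdig, Bool.not_true, Bool.false_or, List.sum_cons]
        split_ifs with hany
        · rfl
        · omega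
      · have hdig' : PySem.Chars.strIsdigit kv.2.toList = false := by simpa using hdig
        have hacc : pvAcc p kv a = -1 := by
          rw [pvAcc, if_pos hsw, if_pos (by simp [hdig'])]
        rw [List.foldl_cons, hacc, pvSticky, List.filter_cons, if_pos hsw]
        simp [hdig']
    · have hacc : pvAcc p kv a = a := by
        rw [pvAcc, if_neg hsw]
      rw [List.foldl_cons, hacc, ih _ ha, List.filter_cons, if_neg hsw]

theorem pvAcc_total (p : String) (ivs : List (String × String)) :
    ivs.foldl (fun x kv => pvAcc p kv x) 0 = pvTotal ivs p := by
  rw [pvAcc_foldl p ivs 0 le_rfl, pvTotal]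
  simp

-- the three if/elif cascades are pvLabel on the corresponding threshold table
theorem pvLabel_h (s : Int) :
    pvLabel s [(18, "Áhætta 1"), (21, "Áhætta 2"), (23, "Óvissa")] =
      (if s == -1 then "Vantar gögn"
       else if s ≤ 18 then "Áhætta 1 (" ++ PySem.Int.toStr s ++ ")"
       else if s ≤ 21 then "Áhætta 2 (" ++ PySem.Int.toStr s ++ ")"
       else if s ≤ 23 then "Óvissa (" ++ PySem.Int.toStr s ++ ")"
       else "Utan áhættu") := by
  rw [pvLabel]
  by_cases h1 : (s == -1) = true
  · rw [if_pos h1, if_pos h1]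
  · rw [if_neg h1, if_neg h1]
    by_cases h2 : s ≤ 18
    · rw [if_pos h2]
      simp only [List.find?, decide_eq_true h2]
      rfl
    · rw [if_neg h2, List.find?, decide_eq_false h2]
      by_cases h3 : s ≤ 21
      · rw [if_pos h3]
        simp only [List.find?, decide_eq_true h3]
        rfl
      · rw [if_neg h3, List.find?, decide_eq_false h3]
        by_cases h4 : s ≤ 23
        · rw [if_pos h4]
          simp only [List.find?, decide_eq_true h4]
          rfl
        · rw [if_neg h4, List.find?, decide_eq_false h4]
          rfl
theorem pvLabel_m (s : Int) :
    pvLabel s [(17, "Áhætta 1"), (18, "Áhætta 2"), (19, "Óvissa")] =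
      (if s == -1 then "Vantar gögn"
       else if s ≤ 17 then "Áhætta 1 (" ++ PySem.Int.toStr s ++ ")"
       else if s ≤ 18 then "Áhætta 2 (" ++ PySem.Int.toStr s ++ ")"
       else if s ≤ 19 then "Óvissa (" ++ PySem.Int.toStr s ++ ")"
       else "Utan áhættu") := by
  rw [pvLabel]
  by_cases h1 : (s == -1) = true
  · rw [if_pos h1, if_pos h1]
  · rw [if_neg h1, if_neg h1]
    by_cases h2 : s ≤ 17
    · rw [if_pos h2]
      simp only [List.find?, decide_eq_true h2]
      rfl
    · rw [if_neg h2, List.find?, decide_eq_false h2]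
      by_cases h3 : s ≤ 18
      · rw [if_pos h3]
        simp only [List.find?, decide_eq_true h3]
        rfl
      · rw [if_neg h3, List.find?, decide_eq_false h3]
        by_cases h4 : s ≤ 19
        · rw [if_pos h4]
          simp only [List.find?, decide_eq_true h4]
          rfl
        · rw [if_neg h4, List.find?, decide_eq_false h4]
          rfl
theorem pvLabel_b (s : Int) :
    pvLabel s [(11, "Áhætta 1"), (14, "Áhætta 2"), (15, "Óvissa")] =
      (if s == -1 then "Vantar gögn"
       else if s ≤ 11 then "Áhætta 1 (" ++ PySem.Int.toStr s ++ ")"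
       else if s ≤ 14 then "Áhætta 2 (" ++ PySem.Int.toStr s ++ ")"
       else if s ≤ 15 then "Óvissa (" ++ PySem.Int.toStr s ++ ")"
       else "Utan áhættu") := by
  rw [pvLabel]
  by_cases h1 : (s == -1) = true
  · rw [if_pos h1, if_pos h1]
  · rw [if_neg h1, if_neg h1]
    by_cases h2 : s ≤ 11
    · rw [if_pos h2]
      simp only [List.find?, decide_eq_true h2]
      rfl
    · rw [if_neg h2, List.find?, decide_eq_false h2]
      by_cases h3 : s ≤ 14
      · rw [if_pos h3]
        simp only [List.find?, decide_eq_true h3]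
        rfl
      · rw [if_neg h3, List.find?, decide_eq_false h3]
        by_cases h4 : s ≤ 15
        · rw [if_pos h4]
          simp only [List.find?, decide_eq_true h4]
          rfl
        · rw [if_neg h4, List.find?, decide_eq_false h4]
          rfl

theorem pvCascade (l : List String) (s t1 t2 t3 : Int) (n1 n2 n3 : String) :
    (if s == -1 then l ++ ["Vantar gögn"]
     else if s ≤ t1 then l ++ [n1]
     else if s ≤ t2 then l ++ [n2]
     else if s ≤ t3 then l ++ [n3]
     else l ++ ["Utan áhættu"]) =
      l ++ [if s == -1 then "Vantar gögn"
            else if s ≤ t1 then n1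
            else if s ≤ t2 then n2
            else if s ≤ t3 then n3
            else "Utan áhættu"] := by
  split_ifs <;> rfl

theorem pvHopar1_eq (h m b : Int) :
    pvHopar1 h m b =
      [pvLabel h [(18, "Áhætta 1"), (21, "Áhætta 2"), (23, "Óvissa")],
       pvLabel m [(17, "Áhætta 1"), (18, "Áhætta 2"), (19, "Óvissa")],
       pvLabel b [(11, "Áhætta 1"), (14, "Áhætta 2"), (15, "Óvissa")]] := by
  rw [pvLabel_h, pvLabel_m, pvLabel_b, pvHopar1, pvCascade, pvCascade, pvCascade]
  rfl

-- ===== VERDICT (by name: the statement is the Claim_ definition above) =====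
theorem lesskilnings_hopar_spec : Claim_equal_lesskilnings_hopar := by
  intro aldursbil input_values _
  show lesskilnings_hopar aldursbil input_values = lesskilnings_hopar_alt aldursbil input_values
  rw [lesskilnings_hopar]
  show (if aldursbil == "bil 1" then _ else _) = _
  have hfold : input_values.foldl pvStep (pvMk3 0 0 0) =
      pvMk3 (pvTotal input_values "hljod_") (pvTotal input_values "mal_") (pvTotal input_values "bok_") := by
    rw [pvFoldl_mk3, pvAcc_total, pvAcc_total, pvAcc_total]
  have hbody :
      pvHopar1 ((input_values.foldl pvStep (pvMk3 0 0 0)).getD "hljod_" 0)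
        ((input_values.foldl pvStep (pvMk3 0 0 0)).getD "mal_" 0)
        ((input_values.foldl pvStep (pvMk3 0 0 0)).getD "bok_" 0) =
        lesskilnings_hopar_alt aldursbil input_values := by
    rw [hfold, pvMk3_gd1, pvMk3_gd2, pvMk3_gd3, pvHopar1_eq]
    rfl
  split_ifs <;> exact hbody
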